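-- pv_equiv track=rewrite | github.com/xcepotx/portal-ai-content | yt-automation-onefact-ind/ytshorts/content_loader.py | _strip_header
-- ===== SOURCE A (Python) =====
-- from typing import List, Optional, Dict, Any
--
-- def _strip_header(lines: List[str]) -> List[str]:
--     """
--     remove header lines (#...) and blank lines right after header
--     """
--     out = []
--     in_header = True
--     for ln in lines:
--         s = ln.strip()
--         if in_header and (s.startswith("#") or s == ""):
--             continue
--         in_header = False
--         if s:
--             out.append(s)
--     return out
-- ===== SOURCE B (Python) =====
-- def _strip_header(lines):
--     """
--     remove header lines (#...) and blank lines right after header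
--     """
--     # Phase 1: normalise first — strip everything, discard all blank lines.
--     nonblank = [s for s in (ln.strip() for ln in lines) if s]
--     # Phase 2: the header's comment lines are now exactly the leading '#'-entries.
--     k = 0
--     while k < len(nonblank) and nonblank[k].startswith("#"):
--         k += 1
--     return nonblank[k:]
-- ===== Notes on version B (the rewrite author's own statement) =====
-- stated objective: simpler
-- what changed: Instead of a one-pass state machine over raw lines, B first strips and discards all blank lines globally, then drops the leading run of '#'-lines from the already-filtered list; blank-handling and header-handling are decoupled into two independent passes over different data.
import Mathlib
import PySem

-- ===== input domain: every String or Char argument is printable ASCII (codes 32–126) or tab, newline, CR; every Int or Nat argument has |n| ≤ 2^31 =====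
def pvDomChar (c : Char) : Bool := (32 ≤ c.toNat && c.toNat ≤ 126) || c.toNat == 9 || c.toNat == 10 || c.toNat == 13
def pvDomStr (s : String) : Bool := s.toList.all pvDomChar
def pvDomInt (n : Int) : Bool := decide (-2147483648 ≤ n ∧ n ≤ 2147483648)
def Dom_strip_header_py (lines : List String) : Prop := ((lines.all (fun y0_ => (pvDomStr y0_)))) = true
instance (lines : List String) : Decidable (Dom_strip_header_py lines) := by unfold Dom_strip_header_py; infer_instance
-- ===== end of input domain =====

-- B decouples A's one-pass in_header state machine into two independent passes: strip and drop all blanks globally, then drop the leading '#'-run of the filtered list (simpler decomposition, same cost).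

-- ===== PORT A =====
-- the for-loop of A as structural recursion over (out, in_header)
def stripHeaderLoopA : List String → List String → Bool → List String
  | [], out, _ => out
  | ln :: rest, out, inh =>
    let s := PySem.Str.strip ln
    if inh && (PySem.Str.startswith s "#" || s == "") then
      stripHeaderLoopA rest out inh
    else
      if s ≠ "" then stripHeaderLoopA rest (out ++ [s]) false
      else stripHeaderLoopA rest out false

def strip_header_py (lines : List String) : List String :=
  stripHeaderLoopA lines [] true

-- ===== PORT B =====
-- Source B's while loop: count the leading '#'-entries of the filtered list
def countLeadHash : List String → Nat
  | [] => 0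
  | s :: rest => if PySem.Str.startswith s "#" then 1 + countLeadHash rest else 0

def strip_header_py_alt (lines : List String) : List String :=
  let nonblank := (lines.map PySem.Str.strip).filter (fun s => s ≠ "")
  nonblank.drop (countLeadHash nonblank)

-- ===== PRECONDITION & SPEC =====
def Spec_strip_header_py (lines : List String) (out : List String) : Prop := out = strip_header_py_alt lines
instance (lines : List String) (out : List String) : Decidable (Spec_strip_header_py lines out) := by unfold Spec_strip_header_py; infer_instance

-- ===== CLAIM (what is proved, stated in full; the proofs are below) =====
def Claim_equal_strip_header_py : Prop := ∀ (lines : List String), Dom_strip_header_py lines → Spec_strip_header_py lines (strip_header_py lines)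

-- ===== LEMMAS AND PROOFS =====

-- Source B's counting-while-then-slice equals dropWhile on the '#' predicate
theorem drop_countLeadHash (xs : List String) :
    xs.drop (countLeadHash xs) = xs.dropWhile (fun s => PySem.Str.startswith s "#") := by
  induction xs with
  | nil => rfl
  | cons s rest ih =>
    by_cases h : PySem.Chars.startswith s.toList ['#'] = true
    · simp [countLeadHash, PySem.Str.startswith, h, List.dropWhile, Nat.add_comm, ih]
    · simp [countLeadHash, PySem.Str.startswith, h, List.dropWhile]

-- once in_header is False, A's loop just appends all non-empty stripped lines
theorem stripHeaderLoopA_false (rest : List String) (out : List String) :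
    stripHeaderLoopA rest out false =
      out ++ (rest.map PySem.Str.strip).filter (fun s => s ≠ "") := by
  induction rest generalizing out with
  | nil => simp [stripHeaderLoopA]
  | cons ln tl ih =>
    simp only [stripHeaderLoopA, Bool.false_and, List.map, List.filter]
    by_cases h : PySem.Str.strip ln = ""
    · simp [h, ih]
    · simp [h, ih]

-- while in_header, A's loop computes dropWhile '#' of the filtered stripped lines
theorem stripA_eq_dropWhile (lines : List String) :
    stripHeaderLoopA lines [] true =
      ((lines.map PySem.Str.strip).filter (fun s => s ≠ "")).dropWhile
        (fun s => PySem.Str.startswith s "#") := by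
  induction lines with
  | nil => rfl
  | cons ln tl ih =>
    by_cases hne : PySem.Str.strip ln = ""
    · rw [show stripHeaderLoopA (ln :: tl) [] true = stripHeaderLoopA tl [] true by
        simp [stripHeaderLoopA, hne], ih]
      simp [hne]
    · have hne3 : String.ofList (PySem.Chars.strip ln.toList) ≠ "" := by
        simpa [PySem.Str.strip] using hne
      by_cases hst : PySem.Chars.startswith (PySem.Chars.strip ln.toList) ['#'] = true
      · rw [show stripHeaderLoopA (ln :: tl) [] true = stripHeaderLoopA tl [] true by
          simp [stripHeaderLoopA, PySem.Str.startswith, PySem.Str.strip, hst], ih]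
        simp [hne3, PySem.Str.strip, hst]
      · rw [show stripHeaderLoopA (ln :: tl) [] true
              = stripHeaderLoopA tl [PySem.Str.strip ln] false by
          simp [stripHeaderLoopA, PySem.Str.startswith, hne, hst], stripHeaderLoopA_false]
        simp [hne3, PySem.Str.strip, hst]

-- ===== VERDICT (by name: the statement is the Claim_ definition above) =====
theorem strip_header_py_spec : Claim_equal_strip_header_py := by
  intro lines _
  unfold Spec_strip_header_py strip_header_py strip_header_py_alt
  rw [drop_countLeadHash]
  exact stripA_eq_dropWhile lines
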